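-- pv_equiv track=rewrite | github.com/L1kami/lab6 | PythonProject8/5.3.py | create_hashtag
-- ===== SOURCE A (Python) =====
-- import string
--
-- def create_hashtag(input_string: str) -> str:
--     translator = str.maketrans('', '', string.punctuation)
--
--     cleaned_string = input_string.translate(translator).lower()
--
--     words = [word for word in cleaned_string.split() if word]
--
--     capitalized_words = [word.capitalize() for word in words]
--
--     hashtag_body = "".join(capitalized_words)
--
--     final_hashtag = "#" + hashtag_body
--
--     MAX_LENGTH = 140
--
--     if len(final_hashtag) > MAX_LENGTH:
--         return final_hashtag[:MAX_LENGTH]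
--
--     return final_hashtag
-- ===== SOURCE B (Python) =====
-- import string
--
-- def create_hashtag(input_string: str) -> str:
--     out = ['#']
--     start = True
--     for ch in input_string:
--         if ch in string.punctuation:
--             continue
--         if ch.isspace():
--             start = True
--         else:
--             out.append(ch.upper() if start else ch.lower())
--             start = False
--     return ''.join(out)[:140]
-- ===== Notes on version B (the rewrite author's own statement) =====
-- stated objective: simpler
-- what changed: B replaces A's five-stage pipeline (punctuation-stripping translate, lower, split, per-word capitalize, join) by one character pass with a word-start flag that uppercases the first letter of each word and lowercases the rest.
import Mathlib
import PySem

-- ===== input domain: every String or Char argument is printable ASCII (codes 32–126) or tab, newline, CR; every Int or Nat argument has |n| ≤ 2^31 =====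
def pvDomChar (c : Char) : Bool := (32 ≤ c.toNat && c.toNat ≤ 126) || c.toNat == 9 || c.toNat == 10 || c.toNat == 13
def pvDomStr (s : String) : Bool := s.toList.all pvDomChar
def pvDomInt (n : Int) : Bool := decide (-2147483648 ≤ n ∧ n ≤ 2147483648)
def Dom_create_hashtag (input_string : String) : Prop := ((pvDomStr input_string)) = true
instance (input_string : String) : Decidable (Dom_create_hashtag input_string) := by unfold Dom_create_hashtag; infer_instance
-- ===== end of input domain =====

-- B replaces A's translate/lower/split/capitalize/join pipeline by a single character pass with a
-- word-start flag (objective: simpler decomposition; same O(n) cost).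

-- ===== PORT A =====
-- string.punctuation
def pyPunctuation : List Char := "!\"#$%&'()*+,-./:;<=>?@[\\]^_`{|}~".toList

-- str.capitalize: uppercase the first character, lowercase the rest (exact on the ASCII domain,
-- where Python's titlecase of the first character coincides with uppercase)
def pyCapitalize : List Char → List Char
  | [] => []
  | c :: r => PySem.Chars.upperChar c :: PySem.Chars.lower r

def create_hashtag (input_string : String) : String :=
  -- input_string.translate(str.maketrans('', '', string.punctuation)): delete punctuation chars
  let cleaned_string := PySem.Chars.lower
    (input_string.toList.filter (fun c => !(pyPunctuation.contains c)))
  let words := (PySem.Chars.split₀ cleaned_string).filter (fun w => !w.isEmpty)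
  let capitalized_words := words.map pyCapitalize
  let hashtag_body := PySem.Chars.join [] capitalized_words
  let final_hashtag := '#' :: hashtag_body
  if 140 < final_hashtag.length then String.ofList (final_hashtag.take 140)
  else String.ofList final_hashtag

-- ===== PORT B =====
def bStep (st : Bool × List Char) (c : Char) : Bool × List Char :=
  if pyPunctuation.contains c then st
  else if PySem.Chars.isspace c then (true, st.2)
  else (false, st.2 ++ [if st.1 then PySem.Chars.upperChar c else PySem.Chars.lowerChar c])

def create_hashtag_alt (input_string : String) : String :=
  String.ofList ((input_string.toList.foldl bStep (true, ['#'])).2.take 140)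

-- ===== PRECONDITION & SPEC =====
def Spec_create_hashtag (input_string : String) (out : String) : Prop := out = create_hashtag_alt input_string
instance (input_string : String) (out : String) : Decidable (Spec_create_hashtag input_string out) := by unfold Spec_create_hashtag; infer_instance

-- ===== CLAIM (what is proved, stated in full; the proofs are below) =====
def Claim_equal_create_hashtag : Prop := ∀ (input_string : String), Dom_create_hashtag input_string → Spec_create_hashtag input_string (create_hashtag input_string)

-- ===== LEMMAS AND PROOFS =====

def nonsp (c : Char) : Bool := !PySem.Chars.isspace c

def cleanOf (cs : List Char) : List Char :=
  PySem.Chars.lower (cs.filter (fun c => !(pyPunctuation.contains c)))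

def outA (ds : List Char) : List Char :=
  PySem.Chars.join [] (((PySem.Chars.split₀ ds).filter (fun w => !w.isEmpty)).map pyCapitalize)

def restOf : Bool → List Char → List Char
  | true, ds => outA ds
  | false, ds => ds.takeWhile nonsp ++ outA (ds.dropWhile nonsp)

-- character-level facts
lemma isupper_bounds (c : Char) (h : PySem.Chars.isupper c = true) :
    65 ≤ c.toNat ∧ c.toNat ≤ 90 := by
  simpa [PySem.Chars.isupper, Char.le_def] using h

lemma lowerChar_toNat (c : Char) (h : PySem.Chars.isupper c = true) :
    (PySem.Chars.lowerChar c).toNat = c.toNat + 32 := by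
  obtain ⟨h1, h2⟩ := isupper_bounds c h
  have hv : Nat.isValidChar (c.toNat + 32) := Or.inl (by omega)
  simp [PySem.Chars.lowerChar, h, Char.ofNat, hv, Char.ofNatAux]
  omega

lemma isspace_iff_toNat (c : Char) :
    PySem.Chars.isspace c = true ↔
      (c.toNat = 32 ∨ (9 ≤ c.toNat ∧ c.toNat ≤ 13) ∨ (28 ≤ c.toNat ∧ c.toNat ≤ 31) ∨
       c.toNat = 133 ∨ c.toNat = 160 ∨ c.toNat = 5760 ∨ (8192 ≤ c.toNat ∧ c.toNat ≤ 8202) ∨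
       c.toNat = 8232 ∨ c.toNat = 8233 ∨ c.toNat = 8239 ∨ c.toNat = 8287 ∨ c.toNat = 12288) := by
  simp [PySem.Chars.isspace]; tauto

lemma lowerChar_of_not_upper (c : Char) (h : PySem.Chars.isupper c = false) :
    PySem.Chars.lowerChar c = c := by
  simp [PySem.Chars.lowerChar, h]

lemma islower_iff (c : Char) :
    PySem.Chars.islower c = true ↔ 97 ≤ c.toNat ∧ c.toNat ≤ 122 := by
  simp [PySem.Chars.islower, Char.le_def, UInt32.le_iff_toNat_le]

lemma isspace_lowerChar (c : Char) :
    PySem.Chars.isspace (PySem.Chars.lowerChar c) = PySem.Chars.isspace c := by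
  by_cases h : PySem.Chars.isupper c = true
  · obtain ⟨h1, h2⟩ := isupper_bounds c h
    have ht := lowerChar_toNat c h
    have l : PySem.Chars.isspace (PySem.Chars.lowerChar c) = false := by
      rw [← Bool.not_eq_true]; rw [isspace_iff_toNat]; omega
    have r : PySem.Chars.isspace c = false := by
      rw [← Bool.not_eq_true]; rw [isspace_iff_toNat]; omega
    rw [l, r]
  · simp [PySem.Chars.lowerChar, h]

lemma lowerChar_lowerChar (c : Char) :
    PySem.Chars.lowerChar (PySem.Chars.lowerChar c) = PySem.Chars.lowerChar c := by
  by_cases h : PySem.Chars.isupper c = true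
  · have ht := lowerChar_toNat c h
    obtain ⟨h1, h2⟩ := isupper_bounds c h
    have hu : PySem.Chars.isupper (PySem.Chars.lowerChar c) = false := by
      rw [← Bool.not_eq_true]; intro hh
      obtain ⟨a, b⟩ := isupper_bounds _ hh; omega
    exact lowerChar_of_not_upper _ hu
  · simp [PySem.Chars.lowerChar, h]

lemma upperChar_lowerChar (c : Char) :
    PySem.Chars.upperChar (PySem.Chars.lowerChar c) = PySem.Chars.upperChar c := by
  by_cases h : PySem.Chars.isupper c = true
  · have ht := lowerChar_toNat c h
    obtain ⟨h1, h2⟩ := isupper_bounds c h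
    have hl : PySem.Chars.islower (PySem.Chars.lowerChar c) = true := by
      rw [islower_iff]; omega
    have hnl : PySem.Chars.islower c = false := by
      rw [← Bool.not_eq_true, islower_iff]; omega
    have : (PySem.Chars.lowerChar c).toNat - 32 = c.toNat := by omega
    simp [PySem.Chars.upperChar, hl, hnl, this, Char.ofNat_toNat]
  · simp [PySem.Chars.lowerChar, h]

lemma lower_fixed (l : List Char) (h : ∀ x ∈ l, PySem.Chars.lowerChar x = x) :
    PySem.Chars.lower l = l := by
  simp only [PySem.Chars.lower]
  simpa using List.map_congr_left h

-- split₀ recurrences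
lemma go_acc (ds : List Char) : ∀ cur acc,
    PySem.Chars.split₀.go ds cur acc = acc.reverse ++ PySem.Chars.split₀.go ds cur [] := by
  induction ds with
  | nil => intro cur acc; simp only [PySem.Chars.split₀.go]; split <;> simp
  | cons c ds ih =>
    intro cur acc
    simp only [PySem.Chars.split₀.go]
    split
    · split
      · rw [ih [] acc]
      · rw [ih [] (cur.reverse :: acc), ih [] [cur.reverse]]; simp
    · rw [ih (c :: cur) acc]

lemma split₀_nil : PySem.Chars.split₀ [] = [] := rfl

lemma split₀_cons_space (c : Char) (ds : List Char) (h : PySem.Chars.isspace c = true) :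
    PySem.Chars.split₀ (c :: ds) = PySem.Chars.split₀ ds := by
  simp only [PySem.Chars.split₀, PySem.Chars.split₀.go, h, if_true, List.isEmpty_nil]

lemma go_word (ds : List Char) : ∀ cur, cur ≠ [] →
    PySem.Chars.split₀.go ds cur [] =
      (cur.reverse ++ ds.takeWhile nonsp) :: PySem.Chars.split₀ (ds.dropWhile nonsp) := by
  induction ds with
  | nil =>
    intro cur hc
    simp [PySem.Chars.split₀.go, split₀_nil, List.isEmpty_iff, hc]
  | cons c ds ih =>
    intro cur hc
    by_cases h : PySem.Chars.isspace c = true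
    · have hn : nonsp c = false := by simp [nonsp, h]
      have e1 : PySem.Chars.split₀.go (c :: ds) cur [] =
          PySem.Chars.split₀.go ds [] [cur.reverse] := by
        simp only [PySem.Chars.split₀.go, h, if_true, List.isEmpty_iff, if_neg hc]
      have e2 : PySem.Chars.split₀.go ds [] ([] : List (List Char)) = PySem.Chars.split₀ ds := rfl
      rw [e1, go_acc ds [] [cur.reverse], e2]
      simp [hn, split₀_cons_space c ds h]
    · have hn : nonsp c = true := by simp [nonsp, h]
      simp only [PySem.Chars.split₀.go, h]
      rw [if_neg (by simp), ih (c :: cur) (by simp)]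
      simp [hn]

lemma split₀_cons_nonspace (c : Char) (ds : List Char) (h : PySem.Chars.isspace c = false) :
    PySem.Chars.split₀ (c :: ds) =
      (c :: ds.takeWhile nonsp) :: PySem.Chars.split₀ (ds.dropWhile nonsp) := by
  have : PySem.Chars.split₀ (c :: ds) = PySem.Chars.split₀.go ds [c] [] := by
    simp only [PySem.Chars.split₀, PySem.Chars.split₀.go, h]
    simp
  rw [this, go_word ds [c] (by simp)]
  simp

lemma join_nil_cons (w : List Char) (ws : List (List Char)) :
    PySem.Chars.join [] (w :: ws) = w ++ PySem.Chars.join [] ws := by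
  cases ws with
  | nil => simp [PySem.Chars.join, List.intercalate]
  | cons b l => simp [PySem.Chars.join, List.intercalate, List.intersperse]

-- the cleaned tail of a word is already lowercase
lemma lower_takeWhile_clean (cs : List Char) :
    PySem.Chars.lower ((cleanOf cs).takeWhile nonsp) = (cleanOf cs).takeWhile nonsp := by
  apply lower_fixed
  intro x hx
  have hx' : x ∈ cleanOf cs := (List.takeWhile_sublist nonsp).subset hx
  simp only [cleanOf, PySem.Chars.lower, List.mem_map] at hx'
  obtain ⟨y, _, rfl⟩ := hx'
  exact lowerChar_lowerChar y

lemma cleanOf_cons_punct (c : Char) (cs : List Char) (h : pyPunctuation.contains c = true) :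
    cleanOf (c :: cs) = cleanOf cs := by
  have hm : c ∈ pyPunctuation := by simpa using h
  simp [cleanOf, hm]

lemma cleanOf_cons_keep (c : Char) (cs : List Char) (h : pyPunctuation.contains c = false) :
    cleanOf (c :: cs) = PySem.Chars.lowerChar c :: cleanOf cs := by
  have hm : c ∉ pyPunctuation := by simpa using h
  simp [cleanOf, hm, PySem.Chars.lower]

lemma outA_cons_nonspace (d : Char) (ds : List Char) (h : PySem.Chars.isspace d = false) :
    outA (d :: ds) =
      PySem.Chars.upperChar d ::
        (PySem.Chars.lower (ds.takeWhile nonsp) ++ outA (ds.dropWhile nonsp)) := by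
  simp only [outA, split₀_cons_nonspace d ds h, List.filter_cons, List.isEmpty_cons,
    Bool.not_false, if_true, List.map_cons]
  rw [join_nil_cons]
  simp [pyCapitalize]

lemma fold_invariant (cs : List Char) : ∀ (start : Bool) (acc : List Char),
    (cs.foldl bStep (start, acc)).2 = acc ++ restOf start (cleanOf cs) := by
  induction cs with
  | nil => intro start acc; cases start <;> simp [restOf, outA, cleanOf, split₀_nil,
      PySem.Chars.lower, PySem.Chars.join, List.intercalate]
  | cons c cs ih =>
    intro start acc
    by_cases hp : pyPunctuation.contains c = true
    · simp only [List.foldl_cons, bStep, hp, if_true, cleanOf_cons_punct c cs hp]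
      exact ih start acc
    · have hp' : pyPunctuation.contains c = false := by simpa using hp
      rw [cleanOf_cons_keep c cs hp']
      by_cases hs : PySem.Chars.isspace c = true
      · have hls : PySem.Chars.isspace (PySem.Chars.lowerChar c) = true := by
          rw [isspace_lowerChar]; exact hs
        have hn : nonsp (PySem.Chars.lowerChar c) = false := by simp [nonsp, hls]
        simp only [List.foldl_cons, bStep, hp', Bool.false_eq_true, if_false, hs, if_true]
        rw [ih true acc]
        cases start
        · simp [restOf, hn, split₀_cons_space _ _ hls, outA]
        · simp [restOf, split₀_cons_space _ _ hls, outA]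
      · have hs' : PySem.Chars.isspace c = false := by simpa using hs
        have hls : PySem.Chars.isspace (PySem.Chars.lowerChar c) = false := by
          rw [isspace_lowerChar]; exact hs'
        have hn : nonsp (PySem.Chars.lowerChar c) = true := by simp [nonsp, hls]
        simp only [List.foldl_cons, bStep, hp', Bool.false_eq_true, if_false, hs']
        rw [ih false _]
        cases start
        · simp [restOf, hn]
        · simp only [restOf, outA_cons_nonspace _ _ hls, upperChar_lowerChar,
            lower_takeWhile_clean]
          simp

theorem ports_agree (s : String) : create_hashtag s = create_hashtag_alt s := by
  have hb : (s.toList.foldl bStep (true, ['#'])).2 = '#' :: outA (cleanOf s.toList) := by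
    rw [fold_invariant s.toList true ['#']]; simp [restOf]
  have ha : create_hashtag s =
      if 140 < ('#' :: outA (cleanOf s.toList)).length
      then String.ofList (('#' :: outA (cleanOf s.toList)).take 140)
      else String.ofList ('#' :: outA (cleanOf s.toList)) := rfl
  rw [ha]
  unfold create_hashtag_alt
  rw [hb]
  split
  · rfl
  · rename_i h
    rw [List.take_of_length_le (by omega)]

-- ===== VERDICT (by name: the statement is the Claim_ definition above) =====
theorem create_hashtag_spec : Claim_equal_create_hashtag := by
  intro s _
  unfold Spec_create_hashtag
  exact ports_agree s
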